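-- pv_equiv track=rewrite | github.com/sir-gon/algorithm-exercises-py | src/hackerrank/interview_preparation_kit/arrays/new_year_chaos.py | minimumBribesCompute
-- ===== SOURCE A (Python) =====
-- def minimumBribesCompute(queue: list[int]) -> 'int | None':
--     bribes = 0
--
--     for i, value in enumerate(queue):
--         position = i + 1
--
--         if value - position > 2:
--             return None
--
--         for k in queue[max(value - 2, 0):i]:
--             if k > value:
--                 bribes += 1
--
--     return bribes
-- ===== SOURCE B (Python) =====
-- def minimumBribesCompute(queue: list[int]) -> 'int | None':
--     n = len(queue)
--     if any(value - i > 3 for i, value in enumerate(queue)):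
--         return None
--     bribes = 0
--     for j in range(n):
--         threshold = min(queue[j], j + 3)
--         for i in range(j + 1, n):
--             if queue[i] < threshold:
--                 bribes += 1
--     return bribes
-- ===== Notes on version B (the rewrite author's own statement) =====
-- stated objective: alternative
-- what changed: B splits the work into a separate total chaos pre-scan (replacing A's early return inside the counting loop) and then counts bribes with the loop order transposed: for each position j it counts later positions holding a value below min(queue[j], j+3), instead of A's per-element backward window slice queue[max(v-2,0):i].
import Mathlib
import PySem

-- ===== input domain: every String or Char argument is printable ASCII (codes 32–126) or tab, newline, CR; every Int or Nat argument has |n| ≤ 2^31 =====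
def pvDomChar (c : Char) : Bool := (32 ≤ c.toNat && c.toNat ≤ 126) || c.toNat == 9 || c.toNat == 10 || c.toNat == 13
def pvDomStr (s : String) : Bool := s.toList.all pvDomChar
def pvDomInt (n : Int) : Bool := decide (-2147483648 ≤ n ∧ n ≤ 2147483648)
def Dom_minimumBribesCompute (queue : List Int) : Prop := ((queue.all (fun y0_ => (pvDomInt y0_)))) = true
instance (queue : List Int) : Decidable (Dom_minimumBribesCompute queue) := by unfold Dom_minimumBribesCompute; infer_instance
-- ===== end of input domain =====

-- B replaces A's early-returning per-element backward window scan by a separate chaos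
-- pre-scan followed by a transposed pairwise count (for each j, later values below
-- min(queue[j], j+3)); objective: alternative (same asymptotic cost, no speed claim).

-- ===== PORT A =====
-- 'for i, value in enumerate(queue)' with an early 'return None' → structural recursion
-- over the remaining list with an index counter; the inner 'for k in queue[max(value-2,0):i]'
-- is a fold over the slice.
def pvGoA (queue : List Int) : Nat → List Int → Int → Option Int
  | _, [], bribes => some bribes
  | i, value :: rest, bribes =>
    if value - ((i : Int) + 1) > 2 then none
    else pvGoA queue (i + 1) rest
      ((PySem.List.slice queue (some (max (value - 2) 0)) (some (i : Int))).foldl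
        (fun b k => if k > value then b + 1 else b) bribes)

def minimumBribesCompute (queue : List Int) : Option Int := pvGoA queue 0 queue 0

-- ===== PORT B =====
def minimumBribesCompute_alt (queue : List Int) : Option Int :=
  let n : Int := queue.length
  if (PySem.List.enumerate queue).any (fun p => p.2 - p.1 > 3) then none
  else
    some ((PySem.List.pyRange 0 n).foldl (fun bribes j =>
      let threshold := min (PySem.List.pyGetD queue j 0) (j + 3)
      (PySem.List.pyRange (j + 1) n).foldl
        (fun b i => if PySem.List.pyGetD queue i 0 < threshold then b + 1 else b) bribes) 0)

-- ===== PRECONDITION & SPEC =====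
def Spec_minimumBribesCompute (queue : List Int) (out : Option Int) : Prop := out = minimumBribesCompute_alt queue
instance (queue : List Int) (out : Option Int) : Decidable (Spec_minimumBribesCompute queue out) := by unfold Spec_minimumBribesCompute; infer_instance

-- ===== CLAIM (what is proved, stated in full; the proofs are below) =====
def Claim_equal_minimumBribesCompute : Prop := ∀ (queue : List Int), Dom_minimumBribesCompute queue → Spec_minimumBribesCompute queue (minimumBribesCompute queue)

-- ===== LEMMAS AND PROOFS =====

-- the indicator of one "bribe" pair: the value at position j overtook the value at position i
def pvInd (q : List Int) (i j : Nat) : Int :=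
  if j < i ∧ q.getD j 0 > q.getD i 0 ∧ q.getD i 0 - 2 ≤ (j : Int) then 1 else 0

-- A's inner count at position i
def pvCA (q : List Int) (i : Nat) : Int :=
  ((PySem.List.slice q (some (max (q.getD i 0 - 2) 0)) (some (i : Int))).countP
    (fun k => k > q.getD i 0) : Int)

-- B's inner count at position j
def pvCB (q : List Int) (j : Nat) : Int :=
  ((PySem.List.pyRange ((j : Int) + 1) q.length).countP
    (fun i => PySem.List.pyGetD q i 0 < min (q.getD j 0) ((j : Int) + 3)) : Int)

lemma pv_foldl_count (p : Int → Prop) [DecidablePred p] (l : List Int) (a : Int) :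
    l.foldl (fun b k => if p k then b + 1 else b) a = a + (l.countP (fun k => decide (p k)) : Int) := by
  induction l generalizing a with
  | nil => simp
  | cons x l ih =>
    simp only [List.foldl_cons, List.countP_cons, ih]
    by_cases h : p x <;> simp [h] <;> ring

lemma pv_sum_range_list (f : Nat → Int) (n : Nat) :
    ((List.range n).map f).sum = ∑ j ∈ Finset.range n, f j := by
  induction n with
  | zero => simp
  | succ n ih => simp [List.range_succ, Finset.sum_range_succ, ih]

lemma pv_countP_range' (g : Nat → Bool) (a c : Nat) :
    (((List.range' a c).countP g : Nat) : Int) =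
      ∑ j ∈ Finset.Ico a (a + c), if g j then 1 else 0 := by
  induction c with
  | zero => simp
  | succ c ih =>
    rw [List.range'_concat, List.countP_append,
      show a + (c + 1) = (a + c) + 1 by omega,
      Finset.sum_Ico_succ_top (by omega)]
    push_cast
    rw [ih]
    by_cases hg : g (a + c) <;> simp [hg]

lemma pv_drop_take_eq (q : List Int) (a b : Nat) (hb : b ≤ q.length) :
    (q.drop a).take (b - a) = (List.range' a (b - a)).map (fun j => q.getD j 0) := by
  apply List.ext_getElem
  · simp
    omega
  · intro k h1 h2
    simp at h1 ⊢
    simp [List.getElem?_eq_getElem (show a + k < q.length by omega)]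

lemma pv_cA_eq (q : List Int) (i : Nat) (hi : i < q.length) :
    pvCA q i = ∑ j ∈ Finset.range q.length, pvInd q i j := by
  unfold pvCA
  set v := q.getD i 0 with hv
  have h0 : (0 : Int) ≤ max (v - 2) 0 := le_max_right _ _
  rw [PySem.List.slice_toNat q h0 (Int.natCast_nonneg i)]
  set a : Nat := (max (v - 2) 0).toNat with hadef
  have ha : (a : Int) = max (v - 2) 0 := Int.toNat_of_nonneg h0
  simp only [Int.toNat_natCast]
  have hsub : Finset.Ico a i ⊆ Finset.range q.length := by
    intro j hj; simp only [Finset.mem_Ico] at hj; exact Finset.mem_range.mpr (by omega)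
  have hvan : ∀ j ∈ Finset.range q.length, j ∉ Finset.Ico a i → pvInd q i j = 0 := by
    intro j hjr hj
    simp only [Finset.mem_Ico, not_and, not_lt] at hj
    unfold pvInd
    rw [← hv, if_neg]
    rintro ⟨h1, _, h3⟩
    have : a ≤ j := by omega
    omega
  rw [← Finset.sum_subset hsub hvan]
  rcases Nat.lt_or_ge i a with hlt | hle
  · rw [show i - a = 0 by omega, Finset.Ico_eq_empty (by omega : ¬ a < i)]
    simp
  · rw [pv_drop_take_eq q a i (le_of_lt hi), List.countP_map, pv_countP_range',
      show a + (i - a) = i by omega]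
    apply Finset.sum_congr rfl
    intro j hj
    simp only [Finset.mem_Ico] at hj
    have hja : v - 2 ≤ (j : Int) := by omega
    unfold pvInd
    rw [← hv]
    simp only [Function.comp]
    by_cases hgt : q.getD j 0 > v
    · rw [if_pos (by simpa using hgt), if_pos ⟨hj.2, hgt, hja⟩]
    · rw [if_neg (by simpa using hgt), if_neg (by tauto)]

lemma pv_countP_pyRange (g : Int → Bool) (a n : Nat) :
    (((PySem.List.pyRange (a : Int) (n : Int)).countP g : Nat) : Int) =
      ∑ i ∈ Finset.Ico a n, if g i then 1 else 0 := by
  induction n with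
  | zero =>
    rw [show ((0 : Nat) : Int) = 0 by rfl, PySem.List.pyRange_one_eq_nil (by exact_mod_cast Nat.zero_le a)]
    simp
  | succ n ih =>
    rcases Nat.lt_or_ge n a with h | h
    · rw [PySem.List.pyRange_one_eq_nil (by exact_mod_cast h),
        Finset.Ico_eq_empty (by omega)]
      simp
    · rw [show ((n + 1 : Nat) : Int) = (n : Int) + 1 by push_cast; ring,
        PySem.List.pyRange_one_succ_right (by exact_mod_cast h),
        List.countP_append, Finset.sum_Ico_succ_top h]
      push_cast
      rw [ih]
      by_cases hg : g (n : Int) <;> simp [hg]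

lemma pv_cB_eq (q : List Int) (j : Nat) (hj : j < q.length) :
    pvCB q j = ∑ i ∈ Finset.range q.length, pvInd q i j := by
  unfold pvCB
  rw [show ((j : Int) + 1) = ((j + 1 : Nat) : Int) by push_cast; ring, pv_countP_pyRange]
  have hsub : Finset.Ico (j + 1) q.length ⊆ Finset.range q.length := by
    intro i hi; simp only [Finset.mem_Ico] at hi; exact Finset.mem_range.mpr (by omega)
  have hvan : ∀ i ∈ Finset.range q.length, i ∉ Finset.Ico (j + 1) q.length → pvInd q i j = 0 := by
    intro i hir hi
    simp only [Finset.mem_Ico, not_and, not_lt] at hi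
    unfold pvInd
    rw [if_neg]
    rintro ⟨h1, _, _⟩
    simp only [Finset.mem_range] at hir
    omega
  rw [← Finset.sum_subset hsub hvan]
  apply Finset.sum_congr rfl
  intro i hi
  simp only [Finset.mem_Ico] at hi
  unfold pvInd
  simp only [PySem.List.pyGetD_natCast]
  by_cases hc : q.getD i 0 < min (q.getD j 0) ((j : Int) + 3)
  · have hc' := lt_min_iff.mp hc
    rw [if_pos (by simpa using hc), if_pos ⟨by omega, hc'.1, by omega⟩]
  · rw [if_neg (by simpa using hc), if_neg]
    rintro ⟨h1, h2, h3⟩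
    exact hc (lt_min_iff.mpr ⟨h2, by omega⟩)

lemma pv_goA_eq (q : List Int) : ∀ (d i : Nat) (b : Int), i + d = q.length →
    pvGoA q i (q.drop i) b =
      if (List.range' i d).any (fun m => q.getD m 0 - ((m : Int) + 1) > 2) then none
      else some (b + ∑ m ∈ Finset.Ico i q.length, pvCA q m) := by
  intro d
  induction d with
  | zero =>
    intro i b h
    rw [show i = q.length by omega, List.drop_length]
    simp [pvGoA]
  | succ d ih =>
    intro i b h
    have hi : i < q.length := by omega
    rw [List.drop_eq_getElem_cons hi]
    have hget : q[i] = q.getD i 0 := (List.getD_eq_getElem q 0 hi).symm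
    simp only [pvGoA, List.range'_succ, List.any_cons]
    by_cases hc : q.getD i 0 - ((i : Int) + 1) > 2
    · rw [if_pos (by rw [hget]; exact hc)]
      have hd : decide (q.getD i 0 - ((i : Int) + 1) > 2) = true := decide_eq_true hc
      simp only [hd, Bool.true_or]
      rfl
    · rw [if_neg (by rw [hget]; exact hc)]
      rw [pv_foldl_count (fun k => k > q[i]), ih (i + 1) _ (by omega)]
      have hcount : ((PySem.List.slice q (some (max (q[i] - 2) 0)) (some (i : Int))).countP
          (fun k => decide (k > q[i])) : Int) = pvCA q i := by
        unfold pvCA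
        rw [hget]
      rw [hcount]
      have hd : decide (q.getD i 0 - ((i : Int) + 1) > 2) = false := decide_eq_false hc
      simp only [hd, Bool.false_or]
      split
      · rfl
      · rw [Finset.sum_eq_sum_Ico_succ_bot hi]
        congr 1
        ring

lemma pv_chaos_eq (q : List Int) :
    (PySem.List.enumerate q).any (fun p => p.2 - p.1 > 3) =
      (List.range' 0 q.length).any (fun m => q.getD m 0 - ((m : Int) + 1) > 2) := by
  rw [Bool.eq_iff_iff]
  simp only [List.any_eq_true, PySem.List.mem_enumerate_iff, List.mem_range'_1,
    decide_eq_true_eq]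
  constructor
  · rintro ⟨p, ⟨k, hk, rfl⟩, hgt⟩
    refine ⟨k, ⟨by omega, by omega⟩, ?_⟩
    rw [List.getD_eq_getElem q 0 hk]
    simp at hgt
    omega
  · rintro ⟨m, ⟨_, hm⟩, hgt⟩
    have hm' : m < q.length := by omega
    refine ⟨(0 + (m : Int), q[m]), ⟨m, hm', rfl⟩, ?_⟩
    rw [List.getD_eq_getElem q 0 hm'] at hgt
    simp
    omega

lemma pv_outer_fold (q : List Int) : ∀ (l : List Nat) (acc : Int),
    List.foldl (fun (x : Int) (y : Nat) =>
      List.foldl (fun b i =>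
          if PySem.List.pyGetD q i 0 < min (PySem.List.pyGetD q ((y : Int)) 0) ((y : Int) + 3) then b + 1 else b)
        x (PySem.List.pyRange ((y : Int) + 1) (q.length : Int))) acc l
    = acc + (l.map (pvCB q)).sum := by
  intro l
  induction l with
  | nil => intro acc; simp
  | cons y l ih =>
    intro acc
    simp only [List.foldl_cons, List.map_cons, List.sum_cons]
    rw [pv_foldl_count
      (fun i => PySem.List.pyGetD q i 0 < min (PySem.List.pyGetD q (↑y) 0) ((y : Int) + 3)), ih]
    have : ((PySem.List.pyRange ((y : Int) + 1) ↑q.length).countP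
        (fun i => decide (PySem.List.pyGetD q i 0 < min (PySem.List.pyGetD q (↑y) 0) ((y : Int) + 3))) : Int)
        = pvCB q y := by
      unfold pvCB
      rw [PySem.List.pyGetD_natCast]
    rw [this]
    ring

lemma pv_alt_eq (q : List Int) :
    minimumBribesCompute_alt q =
      if (List.range' 0 q.length).any (fun m => q.getD m 0 - ((m : Int) + 1) > 2) then none
      else some (∑ j ∈ Finset.range q.length, pvCB q j) := by
  simp only [minimumBribesCompute_alt]
  rw [pv_chaos_eq]
  split
  · rfl
  · congr 1
    rw [PySem.List.pyRange_zero_nat, List.foldl_map,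
      pv_outer_fold q (List.range q.length) 0, zero_add, pv_sum_range_list]

-- ===== VERDICT (by name: the statement is the Claim_ definition above) =====
theorem minimumBribesCompute_spec : Claim_equal_minimumBribesCompute := by
  intro q _
  unfold Spec_minimumBribesCompute minimumBribesCompute
  have hA := pv_goA_eq q q.length 0 0 (by omega)
  rw [List.drop_zero] at hA
  rw [hA, pv_alt_eq q]
  split
  · rfl
  · rw [zero_add, ← Finset.range_eq_Ico]
    congr 1
    calc ∑ m ∈ Finset.range q.length, pvCA q m
        = ∑ i ∈ Finset.range q.length, ∑ j ∈ Finset.range q.length, pvInd q i j :=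
          Finset.sum_congr rfl (fun i hi => pv_cA_eq q i (Finset.mem_range.mp hi))
      _ = ∑ j ∈ Finset.range q.length, ∑ i ∈ Finset.range q.length, pvInd q i j :=
          Finset.sum_comm
      _ = ∑ j ∈ Finset.range q.length, pvCB q j :=
          Finset.sum_congr rfl (fun j hj => (pv_cB_eq q j (Finset.mem_range.mp hj)).symm)
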